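-- pv_equiv track=rewrite | github.com/dheepakshakthi/DevO | repocontainerizer.py | _generate_manual_setup_section
-- ===== SOURCE A (Python) =====
-- from typing import Dict, List, Optional, Any
--
-- def _generate_manual_setup_section(commands: Dict[str, List[str]]) -> str:
--     """Generate manual setup section for README"""
--     content = ""
--
--     if "install" in commands:
--         content += "#### 1. Install Dependencies\n```bash\n"
--         for cmd in commands["install"]:
--             content += f"{cmd}\n"
--         content += "```\n\n"
--
--     if "setup" in commands:
--         content += "#### 2. Setup Project\n```bash\n"
--         for cmd in commands["setup"]:
--             content += f"{cmd}\n"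
--         content += "```\n\n"
--
--     if "build" in commands:
--         content += "#### 3. Build Project\n```bash\n"
--         for cmd in commands["build"]:
--             content += f"{cmd}\n"
--         content += "```\n\n"
--
--     if "run" in commands:
--         content += "#### 4. Run Application\n```bash\n"
--         for cmd in commands["run"]:
--             content += f"{cmd}\n"
--         content += "```\n\n"
--
--     if "test" in commands:
--         content += "#### 5. Run Tests\n```bash\n"
--         for cmd in commands["test"]:
--             content += f"{cmd}\n"
--         content += "```\n\n"
--
--     return content or "No specific setup commands detected.\n\n"
-- ===== SOURCE B (Python) =====
-- _SECTIONS = {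
--     "install": (1, "Install Dependencies"),
--     "setup": (2, "Setup Project"),
--     "build": (3, "Build Project"),
--     "run": (4, "Run Application"),
--     "test": (5, "Run Tests"),
-- }
--
--
-- def _generate_manual_setup_section(commands):
--     """Scan the dict once, tag each known section with its rank, sort by rank, render."""
--     found = sorted(
--         ((_SECTIONS[key][0], _SECTIONS[key][1], cmds)
--          for key, cmds in commands.items() if key in _SECTIONS),
--         key=lambda t: t[0],
--     )
--     out = "".join(
--         "#### %d. %s\n```bash\n%s```\n\n"
--         % (rank, title, "".join(c + "\n" for c in cmds))
--         for rank, title, cmds in found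
--     )
--     return out or "No specific setup commands detected.\n\n"
-- ===== Notes on version B (the rewrite author's own statement) =====
-- stated objective: alternative
-- what changed: Instead of A's five hard-coded membership probes into the dict, B scans commands.items() once, tags each recognised key with its (rank, title) from a section table, sorts the tagged entries by rank, and renders/joins them; equal cost, input-driven traversal.
import Mathlib
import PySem

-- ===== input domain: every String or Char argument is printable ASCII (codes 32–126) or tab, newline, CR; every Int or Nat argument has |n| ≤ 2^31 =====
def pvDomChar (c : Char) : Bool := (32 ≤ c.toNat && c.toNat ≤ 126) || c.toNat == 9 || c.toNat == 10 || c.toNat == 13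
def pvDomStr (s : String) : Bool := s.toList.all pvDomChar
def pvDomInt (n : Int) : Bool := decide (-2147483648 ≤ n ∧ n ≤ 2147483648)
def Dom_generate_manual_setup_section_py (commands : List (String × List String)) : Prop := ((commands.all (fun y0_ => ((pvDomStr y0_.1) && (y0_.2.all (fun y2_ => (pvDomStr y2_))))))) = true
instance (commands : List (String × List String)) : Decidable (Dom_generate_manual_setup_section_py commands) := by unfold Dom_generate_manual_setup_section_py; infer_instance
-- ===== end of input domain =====

-- B scans the dict once tagging known sections with their rank, sorts by rank, then renders — input-driven sort-then-render instead of A's five fixed membership probes; return-value differences on duplicate-key association lists (impossible for a Python dict) are excluded by Pre_.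


-- ===== PORT A =====
-- Literal transliteration: five sequential if-blocks, each appending a header,
-- then one line per command, then the closing fence; empty content falls back.
def generate_manual_setup_section_py (commands : List (String × List String)) : String :=
  let d := PySem.Dict.mk commands
  let content := ""
  let content :=
    match d.get? "install" with
    | some cmds => cmds.foldl (fun acc cmd => acc ++ (cmd ++ "\n")) (content ++ "#### 1. Install Dependencies\n```bash\n") ++ "```\n\n"
    | none => content
  let content :=
    match d.get? "setup" with
    | some cmds => cmds.foldl (fun acc cmd => acc ++ (cmd ++ "\n")) (content ++ "#### 2. Setup Project\n```bash\n") ++ "```\n\n"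
    | none => content
  let content :=
    match d.get? "build" with
    | some cmds => cmds.foldl (fun acc cmd => acc ++ (cmd ++ "\n")) (content ++ "#### 3. Build Project\n```bash\n") ++ "```\n\n"
    | none => content
  let content :=
    match d.get? "run" with
    | some cmds => cmds.foldl (fun acc cmd => acc ++ (cmd ++ "\n")) (content ++ "#### 4. Run Application\n```bash\n") ++ "```\n\n"
    | none => content
  let content :=
    match d.get? "test" with
    | some cmds => cmds.foldl (fun acc cmd => acc ++ (cmd ++ "\n")) (content ++ "#### 5. Run Tests\n```bash\n") ++ "```\n\n"
    | none => content
  if content = "" then "No specific setup commands detected.\n\n" else content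

-- ===== PORT B =====
-- the _SECTIONS table of Source B
def pvSectionTable : PySem.Dict String (Int × String) :=
  PySem.Dict.mk [("install", (1, "Install Dependencies")), ("setup", (2, "Setup Project")),
    ("build", (3, "Build Project")), ("run", (4, "Run Application")), ("test", (5, "Run Tests"))]

-- "#### %d. %s\n```bash\n%s```\n\n" % (rank, title, "".join(c + "\n" for c in cmds))
def pvRender (t : Int × String × List String) : String :=
  "#### " ++ PySem.Int.toStr t.1 ++ ". " ++ t.2.1 ++ "\n```bash\n" ++
    PySem.Str.join "" (t.2.2.map (fun c => c ++ "\n")) ++ "```\n\n"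

-- B: one pass over commands.items() tagging known keys with (rank, title),
-- sort by rank, render each triple, join, fallback if empty.
def generate_manual_setup_section_py_alt (commands : List (String × List String)) : String :=
  let d := PySem.Dict.mk commands
  let found := PySem.List.sorted
      (d.items.foldl (fun acc p =>
        if pvSectionTable.contains p.1 then
          acc ++ [((pvSectionTable.getD p.1 (0, "")).1, (pvSectionTable.getD p.1 (0, "")).2, p.2)]
        else acc) [])
      (fun t => t.1)
  let out := PySem.Str.join "" (found.map pvRender)
  if out = "" then "No specific setup commands detected.\n\n" else out

-- ===== PRECONDITION & SPEC =====
-- Pre_ excludes association lists with duplicate keys: a Python dict cannot contain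
-- them, and on that encoding corner first-match (A's lookups) versus scanning all
-- items (B) is an accident of the list representation, not of either program.
def Pre_generate_manual_setup_section_py (commands : List (String × List String)) : Prop :=
  (commands.map Prod.fst).Nodup
instance (commands : List (String × List String)) : Decidable (Pre_generate_manual_setup_section_py commands) := by unfold Pre_generate_manual_setup_section_py; infer_instance

def pvWitness_generate_manual_setup_section_py : (List (String × List String)) :=
  [("install", ["pip install -r requirements.txt"]), ("run", ["python app.py"])]

def Spec_generate_manual_setup_section_py (commands : List (String × List String)) (out : String) : Prop := out = generate_manual_setup_section_py_alt commands
instance (commands : List (String × List String)) (out : String) : Decidable (Spec_generate_manual_setup_section_py commands out) := by unfold Spec_generate_manual_setup_section_py; infer_instance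

-- ===== CLAIM (what is proved, stated in full; the proofs are below) =====
def Claim_equal_generate_manual_setup_section_py : Prop := ∀ (commands : List (String × List String)), Dom_generate_manual_setup_section_py commands → Pre_generate_manual_setup_section_py commands → Spec_generate_manual_setup_section_py commands (generate_manual_setup_section_py commands)

-- ===== LEMMAS AND PROOFS =====

-- the five section keys in A's (and the README's) order
def pvKeys : List String := ["install", "setup", "build", "run", "test"]

-- canonical section list: for each present key in order, (rank, title, commands)
def pvCanon (d : PySem.Dict String (List String)) : List (Int × String × List String) :=
  (pvKeys.filter (fun k => d.contains k)).map
    (fun k => ((pvSectionTable.getD k (0, "")).1, (pvSectionTable.getD k (0, "")).2, d.getD k []))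

lemma pv_contains_table (s : String) : pvSectionTable.contains s = pvKeys.contains s := by
  simp [pvSectionTable, pvKeys, PySem.Dict.contains_mk, List.contains_eq_mem, beq_eq_decide, eq_comm]

lemma pv_pairwise (d : PySem.Dict String (List String)) :
    (pvCanon d).Pairwise (fun a b => a.1 < b.1) := by
  unfold pvCanon
  rw [List.pairwise_map]
  refine List.Pairwise.sublist List.filter_sublist ?_
  show List.Pairwise (fun a b => (pvSectionTable.getD a (0, "")).1 < (pvSectionTable.getD b (0, "")).1) pvKeys
  decide

-- B's collected list is a permutation of the canonical list (unique keys)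
lemma pv_perm (d : PySem.Dict String (List String)) (hnd : d.keys.Nodup) :
    (pvCanon d).Perm
      (d.items.foldl (fun acc p =>
        if pvSectionTable.contains p.1 then
          acc ++ [((pvSectionTable.getD p.1 (0, "")).1, (pvSectionTable.getD p.1 (0, "")).2, p.2)]
        else acc) []) := by
  rw [PySem.List.foldl_append_if (fun p => pvSectionTable.contains p.1)
      (fun p => ((pvSectionTable.getD p.1 (0, "")).1, (pvSectionTable.getD p.1 (0, "")).2, p.2)) d.items []]
  simp only [List.nil_append]
  have hmc : ∀ p ∈ d.items.filter (fun p => pvSectionTable.contains p.1),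
      ((pvSectionTable.getD p.1 (0, "")).1, (pvSectionTable.getD p.1 (0, "")).2, p.2)
        = ((pvSectionTable.getD p.1 (0, "")).1, (pvSectionTable.getD p.1 (0, "")).2, d.getD p.1 []) := by
    intro p hp
    obtain ⟨k, v⟩ := p
    rw [PySem.Dict.getD_of_mem_items d (List.mem_of_mem_filter hp) hnd]
  rw [List.map_congr_left hmc]
  have hkeyperm : (pvKeys.filter (fun k => d.contains k)).Perm
      ((d.items.filter (fun p => pvSectionTable.contains p.1)).map Prod.fst) := by
    refine (List.perm_ext_iff_of_nodup (List.Nodup.filter _ (by decide))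
      (List.Nodup.sublist (List.Sublist.map Prod.fst List.filter_sublist) hnd)).mpr ?_
    intro k
    simp only [List.mem_filter, List.mem_map]
    constructor
    · rintro ⟨hk, hc⟩
      have hkk : k ∈ d.keys := (PySem.Dict.contains_iff_mem_keys d k).mp hc
      rcases List.mem_map.mp hkk with ⟨p, hpi, rfl⟩
      exact ⟨p, ⟨hpi, by rw [pv_contains_table]; simpa [List.contains_eq_mem] using hk⟩, rfl⟩
    · rintro ⟨p, ⟨hpi, hc⟩, rfl⟩
      refine ⟨by rw [pv_contains_table] at hc; simpa [List.contains_eq_mem] using hc, ?_⟩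
      exact (PySem.Dict.contains_iff_mem_keys d p.1).mpr (List.mem_map_of_mem hpi)
  have hm := List.Perm.map (fun k => ((pvSectionTable.getD k (0, "")).1, (pvSectionTable.getD k (0, "")).2, d.getD k [])) hkeyperm
  rw [List.map_map] at hm
  exact hm

-- A's per-section command loop equals the join of the newline-terminated commands.
lemma pv_loop_eq (cmds : List String) (s : String) :
    cmds.foldl (fun acc cmd => acc ++ (cmd ++ "\n")) s = s ++ PySem.Str.join "" (cmds.map (fun c => c ++ "\n")) := by
  induction cmds generalizing s with
  | nil => simp [PySem.Str.join]
  | cons c t ih =>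
    simp only [List.foldl, List.map, ih]
    apply String.toList_inj.mp
    cases t <;> simp [PySem.Str.join, PySem.Chars.join_singleton, PySem.Chars.join_cons_cons]

lemma pv_if_congr (a b F : String) (h : a = b) : (if a = "" then F else a) = (if b = "" then F else b) := by rw [h]

-- the table lookups and rank strings of B, as rewrite rules
lemma pv_t1 : pvSectionTable.get? "install" = some (1, "Install Dependencies") := rfl
lemma pv_t2 : pvSectionTable.get? "setup" = some (2, "Setup Project") := rfl
lemma pv_t3 : pvSectionTable.get? "build" = some (3, "Build Project") := rfl
lemma pv_t4 : pvSectionTable.get? "run" = some (4, "Run Application") := rfl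
lemma pv_t5 : pvSectionTable.get? "test" = some (5, "Run Tests") := rfl

lemma pv_c1 : PySem.Int.toChars 1 = ['1'] := rfl
lemma pv_c2 : PySem.Int.toChars 2 = ['2'] := rfl
lemma pv_c3 : PySem.Int.toChars 3 = ['3'] := rfl
lemma pv_c4 : PySem.Int.toChars 4 = ['4'] := rfl
lemma pv_c5 : PySem.Int.toChars 5 = ['5'] := rfl

-- ===== VERDICT (by name: the statement is the Claim_ definition above) =====
set_option maxRecDepth 8192 in
set_option maxHeartbeats 2000000 in
theorem generate_manual_setup_section_py_spec : Claim_equal_generate_manual_setup_section_py := by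
  intro commands _ hpre
  unfold Spec_generate_manual_setup_section_py
  have hnd : (PySem.Dict.mk commands).keys.Nodup := hpre
  simp only [generate_manual_setup_section_py, generate_manual_setup_section_py_alt]
  rw [PySem.List.sorted_eq_of_perm_of_pairwise_lt _ _ _ (pv_perm _ hnd) (pv_pairwise _)]
  apply pv_if_congr
  cases h1 : (PySem.Dict.mk commands).get? "install" <;>
  cases h2 : (PySem.Dict.mk commands).get? "setup" <;>
  cases h3 : (PySem.Dict.mk commands).get? "build" <;>
  cases h4 : (PySem.Dict.mk commands).get? "run" <;>
  cases h5 : (PySem.Dict.mk commands).get? "test" <;>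
    (simp only [h1, h2, h3, h4, h5, pv_loop_eq, pvCanon, pvKeys, pvRender,
       PySem.Dict.contains_eq_isSome_get?, PySem.Dict.getD_eq_get?_getD,
       Option.isSome_some, Option.isSome_none, Option.getD_some,
       List.filter, List.map, pv_t1, pv_t2, pv_t3, pv_t4, pv_t5]
     apply String.toList_inj.mp
     simp [PySem.Str.join, PySem.Chars.join_singleton, PySem.Chars.join_cons_cons,
       pv_t1, pv_t2, pv_t3, pv_t4, pv_t5, pv_c1, pv_c2, pv_c3, pv_c4, pv_c5])
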